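-- pv_equiv track=rewrite | github.com/spitalskya/university-projects | crossword-CSP-solver/crossword.py | split_words_by_length
-- ===== SOURCE A (Python) =====
-- def split_words_by_length(words: list[int]) -> dict[int, set[int]]:
--     """Splits words into sets containing words with same length
--
--     Args:
--         words (list[int]): words to split
--
--     Returns:
--         dict[int, set[int]]: map from length to sets of words with given length
--     """
--     words_by_length: dict[int, set[str]] = {}
--     for i, word in enumerate(words):
--         length: int = len(word)
--         if length not in words_by_length:
--             words_by_length[length] = set()
--         words_by_length[length].add(i)
--     return words_by_length
-- ===== SOURCE B (Python) =====
-- def split_words_by_length(words: list) -> dict: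
--     """Group word indices by word length: first compute all lengths, take the
--     distinct lengths in first-occurrence order, then build each group with one
--     comprehension per length."""
--     lengths = [len(w) for w in words]
--     order = list(dict.fromkeys(lengths))
--     return {L: {i for i, l in enumerate(lengths) if l == L} for L in order}
-- ===== Notes on version B (the rewrite author's own statement) =====
-- stated objective: alternative
-- what changed: A builds the dict incrementally in one hashing pass (conditional set-default then add); B precomputes the length list, dedupes it to get the key order, and builds each group with a separate comprehension over the enumerated lengths.
import Mathlib
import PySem

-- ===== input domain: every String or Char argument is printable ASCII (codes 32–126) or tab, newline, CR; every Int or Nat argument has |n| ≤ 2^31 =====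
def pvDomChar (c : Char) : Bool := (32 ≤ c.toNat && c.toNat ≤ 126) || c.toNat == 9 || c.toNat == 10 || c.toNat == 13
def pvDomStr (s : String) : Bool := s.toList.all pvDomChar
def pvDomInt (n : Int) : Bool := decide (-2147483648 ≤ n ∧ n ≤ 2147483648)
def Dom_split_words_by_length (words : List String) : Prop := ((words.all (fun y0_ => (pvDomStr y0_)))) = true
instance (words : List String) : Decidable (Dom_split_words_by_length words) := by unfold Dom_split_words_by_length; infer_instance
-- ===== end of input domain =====

-- B replaces A's single incremental dict-building pass by: compute the length list,
-- dedupe it for the key order, then build each group by a per-length scan (alternative decomposition, not faster).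


-- ===== PORT A =====
-- A: for i, word in enumerate(words): if len(word) not in d: d[len(word)] = set(); d[len(word)].add(i)
def split_words_by_length (words : List String) : List (Int × List Int) :=
  let d := (PySem.List.enumerate words 0).foldl
    (fun d p =>
      let length : Int := PySem.Str.len p.2
      let d := if d.contains length then d else d.insert length PySem.Set.empty
      -- d[length].add(i): the key is present here, so the `modify` default is never used
      d.modify length PySem.Set.empty (fun s => PySem.Set.add s p.1))
    (PySem.Dict.empty : PySem.Dict Int (List Int))
  d.items

-- ===== PORT B =====
def split_words_by_length_alt (words : List String) : List (Int × List Int) :=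
  let lengths : List Int := words.map (fun w => PySem.Str.len w)
  let order := PySem.List.dedup lengths
  order.map (fun L =>
    (L, PySem.Set.ofList
          (((PySem.List.enumerate lengths 0).filter (fun p => p.2 == L)).map (fun p => p.1))))

-- ===== PRECONDITION & SPEC =====
def Spec_split_words_by_length (words : List String) (out : List (Int × List Int)) : Prop := out = split_words_by_length_alt words
instance (words : List String) (out : List (Int × List Int)) : Decidable (Spec_split_words_by_length words out) := by unfold Spec_split_words_by_length; infer_instance

-- ===== CLAIM (what is proved, stated in full; the proofs are below) =====
def Claim_equal_split_words_by_length : Prop := ∀ (words : List String), Dom_split_words_by_length words → Spec_split_words_by_length words (split_words_by_length words)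

-- ===== LEMMAS AND PROOFS =====

-- A's conditional set-default followed by d[k] = f(d[k]) is exactly one `modify`.
theorem pv_setdefault_modify (d : PySem.Dict Int (List Int)) (k : Int) (f : List Int → List Int) :
    (if d.contains k then d else d.insert k PySem.Set.empty).modify k PySem.Set.empty f
      = d.modify k PySem.Set.empty f := by
  by_cases h : d.contains k = true
  · rw [if_pos h]
  · have h' : d.contains k = false := eq_false_of_ne_true h
    show (if d.contains k then d else d.insert k ([] : List Int)).insert k
        (f ((if d.contains k then d else d.insert k ([] : List Int)).getD k [])) = _
    rw [h']
    simp only [Bool.false_eq_true, if_false]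
    rw [PySem.Dict.getD_insert_self, PySem.Dict.insert_insert_self]
    show _ = d.insert k (f (d.getD k []))
    have hD : d.getD k ([] : List Int) = [] := by simp [pysem, h']
    rw [hD]

-- every element of any value of d is some item's value element or the default is empty
theorem pv_mem_getD (d : PySem.Dict Int (List Int)) (k : Int) (x : Int)
    (hx : x ∈ d.getD k []) : ∃ q ∈ d.items, x ∈ q.2 := by
  rw [PySem.Dict.getD_eq_get?_getD] at hx
  cases hget : d.get? k with
  | none => rw [hget] at hx; simp at hx
  | some v =>
    rw [hget] at hx
    exact ⟨(k, v), PySem.Dict.mem_items_of_get?_eq_some d hget, hx⟩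

-- while the value being added is fresh, Set.add is plain append
theorem pv_fold_add_eq_append (l : List (Int × Int)) (d : PySem.Dict Int (List Int))
    (hvals : ∀ p ∈ l, ∀ q ∈ d.items, p.2 ∉ q.2)
    (hnd : (l.map (·.2)).Nodup) :
    l.foldl (fun d p => d.modify p.1 [] (fun s => PySem.Set.add s p.2)) d
      = l.foldl (fun d p => d.modify p.1 [] (fun s => s ++ [p.2])) d := by
  induction l generalizing d with
  | nil => rfl
  | cons p t ih =>
    simp only [List.map_cons, List.nodup_cons] at hnd
    have hfresh : p.2 ∉ d.getD p.1 [] := by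
      intro hx
      obtain ⟨q, hq, hxq⟩ := pv_mem_getD d p.1 p.2 hx
      exact hvals p (by simp) q hq hxq
    have hstep : d.modify p.1 [] (fun s => PySem.Set.add s p.2)
        = d.modify p.1 [] (fun s => s ++ [p.2]) := by
      show d.insert p.1 (PySem.Set.add (d.getD p.1 []) p.2) = d.insert p.1 (d.getD p.1 [] ++ [p.2])
      rw [PySem.Set.add_of_not_mem hfresh]
    simp only [List.foldl_cons, hstep]
    apply ih
    · intro r hr q hq hxq
      have hq' : q = (p.1, d.getD p.1 [] ++ [p.2]) ∨ (q ∈ d.items ∧ q.1 ≠ p.1) := by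
        have := (PySem.Dict.mem_items_insert
          (d := d) (k := p.1) (v := d.getD p.1 [] ++ [p.2]) (p := q)).mp hq
        exact this
      rcases hq' with hq' | ⟨hq', _⟩
      · subst hq'
        simp only [List.mem_append, List.mem_singleton] at hxq
        rcases hxq with hxq | hxq
        · obtain ⟨q', hq', hxq'⟩ := pv_mem_getD d p.1 r.2 hxq
          exact hvals r (by simp [hr]) q' hq' hxq'
        · have : r.2 ∈ t.map (·.2) := List.mem_map_of_mem hr
          exact hnd.1 (hxq ▸ this)
      · exact hvals r (by simp [hr]) q hq' hxq
    · exact hnd.2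

-- enumerate commutes with map on the underlying list
theorem pv_enumerate_map {α β : Type} (f : α → β) (xs : List α) (s : Int) :
    PySem.List.enumerate (xs.map f) s
      = (PySem.List.enumerate xs s).map (fun p => (p.1, f p.2)) := by
  induction xs generalizing s with
  | nil => simp [PySem.List.enumerate_nil]
  | cons x t ih => simp [PySem.List.enumerate_cons, ih]

-- the indices paired with any fixed length are distinct
theorem pv_group_nodup (lengths : List Int) (L : Int) :
    (((PySem.List.enumerate lengths 0).filter (fun p => p.2 == L)).map (fun p => p.1)).Nodup := by
  have hsub : ((PySem.List.enumerate lengths 0).filter (fun p => p.2 == L)).map (fun p => p.1)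
      |>.Sublist ((PySem.List.enumerate lengths 0).map (fun p => p.1)) :=
    List.Sublist.map _ List.filter_sublist
  have hnd : ((PySem.List.enumerate lengths 0).map (fun p => p.1)).Nodup := by
    rw [show ((PySem.List.enumerate lengths 0).map (fun p => p.1))
        = (PySem.List.enumerate lengths 0).map (·.1) from rfl,
      PySem.List.map_fst_enumerate]
    exact PySem.List.nodup_pyRange_one _ _
  exact hnd.sublist hsub

-- ===== VERDICT (by name: the statement is the Claim_ definition above) =====
theorem split_words_by_length_spec : Claim_equal_split_words_by_length := by
  intro words _
  show split_words_by_length words = split_words_by_length_alt words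
  unfold split_words_by_length split_words_by_length_alt
  set lengths : List Int := words.map (fun w => PySem.Str.len w) with hlen
  set l : List (Int × Int) :=
    (PySem.List.enumerate lengths 0).map (fun p => (p.2, p.1)) with hl
  -- rewrite A's fold over enumerate words into a fold over l
  have hA1 : (PySem.List.enumerate words 0).foldl
      (fun d p =>
        let length : Int := PySem.Str.len p.2
        let d := if d.contains length then d else d.insert length PySem.Set.empty
        d.modify length PySem.Set.empty (fun s => PySem.Set.add s p.1))
      (PySem.Dict.empty : PySem.Dict Int (List Int))
      = l.foldl (fun d p => d.modify p.1 [] (fun s => PySem.Set.add s p.2))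
          PySem.Dict.empty := by
    rw [hl, hlen, pv_enumerate_map, List.map_map, List.foldl_map]
    apply PySem.List.foldl_congr_mem
    intro d p _
    exact pv_setdefault_modify d (PySem.Str.len p.2) (fun s => PySem.Set.add s p.1)
  rw [hA1]
  have hnd2 : (l.map (·.2)).Nodup := by
    rw [hl, List.map_map]
    rw [show ((PySem.List.enumerate lengths 0).map ((·.2) ∘ fun p => (p.2, p.1)))
        = (PySem.List.enumerate lengths 0).map (·.1) from rfl,
      PySem.List.map_fst_enumerate]
    exact PySem.List.nodup_pyRange_one _ _
  rw [pv_fold_add_eq_append l PySem.Dict.empty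
    (by
      intro p hp q hq hx
      simp [show (PySem.Dict.empty : PySem.Dict Int (List Int)).items = [] from rfl] at hq)
    hnd2]
  -- items of the append-fold
  have hndkeys : ((l.foldl (fun d p => d.modify p.1 [] (fun s => s ++ [p.2]))
      (PySem.Dict.empty : PySem.Dict Int (List Int))).keys).Nodup :=
    PySem.Dict.nodup_keys_foldl_modify_key l (fun p => p.1) [] (fun _ p => fun s => s ++ [p.2])
      PySem.Dict.empty PySem.Dict.nodup_keys_empty
  rw [PySem.Dict.items_eq_map_keys _ hndkeys []]
  have hkeys : (l.foldl (fun d p => d.modify p.1 [] (fun s => s ++ [p.2]))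
      (PySem.Dict.empty : PySem.Dict Int (List Int))).keys
      = PySem.List.dedup lengths := by
    rw [PySem.Dict.keys_foldl_modify_key l (fun p => p.1) [] (fun _ p => fun s => s ++ [p.2])]
    rw [show (PySem.Dict.empty : PySem.Dict Int (List Int)).keys = [] from rfl,
      PySem.Set.update_nil_left, PySem.List.dedup_eq_ofList]
    congr 1
    rw [hl, List.map_map,
      show ((PySem.List.enumerate lengths 0).map ((·.1) ∘ fun p => (p.2, p.1)))
        = (PySem.List.enumerate lengths 0).map (·.2) from rfl,
      PySem.List.map_snd_enumerate]
  rw [hkeys]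
  apply List.map_congr_left
  intro L _
  have hgetD : (l.foldl (fun d p => d.modify p.1 [] (fun s => s ++ [p.2]))
      (PySem.Dict.empty : PySem.Dict Int (List Int))).getD L []
      = (l.filter (fun p => p.1 == L)).map (·.2) := by
    rw [PySem.Dict.getD_foldl_modify_append]
    simp [PySem.Dict.getD_empty]
  rw [hgetD]
  have hgroup : (l.filter (fun p => p.1 == L)).map (·.2)
      = ((PySem.List.enumerate lengths 0).filter (fun p => p.2 == L)).map (fun p => p.1) := by
    rw [hl, List.filter_map, List.map_map]
    rfl
  rw [hgroup]
  exact congrArg (Prod.mk L) (PySem.Set.ofList_eq_self_of_nodup _ (pv_group_nodup lengths L)).symm
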